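-- pv_equiv track=rewrite | github.com/mayflower/agentsh | src/agentsh/exec/builtins.py | _ifs_split_n
-- ===== SOURCE A (Python) =====
-- def _ifs_split_n(line: str, ifs: str, n: int) -> list[str]:
--     """Split a line on IFS into at most *n* fields.
--
--     The last field gets the remainder of the line (unsplit).
--     """
--     if n <= 1 or not ifs:
--         return [line]
--
--     ifs_white = "".join(c for c in ifs if c in " \t\n")
--
--     parts: list[str] = []
--     remaining = line
--
--     # Strip leading IFS whitespace
--     if ifs_white:
--         remaining = remaining.lstrip(ifs_white)
--
--     for _ in range(n - 1):
--         if not remaining: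
--             break
--
--         best_pos = _find_ifs_char(remaining, ifs)
--         if best_pos == -1:
--             break
--
--         parts.append(remaining[:best_pos])
--         remaining = remaining[best_pos + 1 :]
--         if ifs_white:
--             remaining = remaining.lstrip(ifs_white)
--
--     # Strip trailing IFS whitespace from the remainder for the last field
--     if ifs_white:
--         remaining = remaining.rstrip(ifs_white)
--     parts.append(remaining)
--
--     return parts
--
-- def _find_ifs_char(s: str, ifs: str) -> int:
--     """Return the index of the first IFS character in *s*, or -1."""
--     for pos, c in enumerate(s):
--         if c in ifs:
--             return pos
--     return -1
-- ===== SOURCE B (Python) =====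
-- import re
--
--
-- def _ifs_split_n(line: str, ifs: str, n: int) -> list[str]:
--     """Split a line on IFS into at most *n* fields (regex-based)."""
--     if n <= 1 or not ifs:
--         return [line]
--
--     ifs_white = "".join(c for c in ifs if c in " \t\n")
--
--     # Delimiter = one IFS char followed by any run of IFS whitespace.
--     pattern = "[" + re.escape(ifs) + "]"
--     if ifs_white:
--         pattern += "[" + re.escape(ifs_white) + "]*"
--         line = line.lstrip(ifs_white)
--
--     fields = re.split(pattern, line, maxsplit=n - 1)
--     if ifs_white:
--         fields[-1] = fields[-1].rstrip(ifs_white)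
--     return fields
-- ===== Notes on version B (the rewrite author's own statement) =====
-- stated objective: idiomatic
-- what changed: Replaces A's manual loop of _find_ifs_char scans, slicing and repeated lstrip with a single regex split: a delimiter pattern '[ifs][ifs_white]*' built with re.escape and one re.split(..., maxsplit=n-1) call, then an rstrip of the last field.
import Mathlib
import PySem

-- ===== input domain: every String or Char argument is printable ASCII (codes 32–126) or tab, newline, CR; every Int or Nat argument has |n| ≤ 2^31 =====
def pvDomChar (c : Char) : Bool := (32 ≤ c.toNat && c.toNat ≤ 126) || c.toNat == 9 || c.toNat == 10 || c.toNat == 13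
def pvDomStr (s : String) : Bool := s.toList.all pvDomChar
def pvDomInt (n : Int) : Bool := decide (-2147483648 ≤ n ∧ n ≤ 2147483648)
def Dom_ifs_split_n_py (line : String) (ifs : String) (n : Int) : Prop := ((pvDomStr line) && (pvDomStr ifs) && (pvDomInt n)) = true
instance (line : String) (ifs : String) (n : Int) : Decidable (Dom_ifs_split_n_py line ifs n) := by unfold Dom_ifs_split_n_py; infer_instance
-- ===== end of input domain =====

-- B replaces A's manual find-first-IFS-char + slice + lstrip loop by one regex split
-- (delimiter = one IFS char followed by a run of IFS whitespace) with maxsplit = n-1;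
-- objective: idiomatic.  Return values agree on all inputs; neither version mutates anything.

-- shared primitive: str.lstrip(chars) on List Char (drop leading chars in the set; exact)
def pvLstripW (cs ws : List Char) : List Char := cs.dropWhile (fun c => ws.contains c)

-- shared primitive: str.rstrip(chars) on List Char (drop trailing chars in the set; exact)
def pvRstripW (cs ws : List Char) : List Char := (cs.reverse.dropWhile (fun c => ws.contains c)).reverse

-- ===== PORT A =====

-- the enumerate loop of _find_ifs_char ('c in ifs' for a 1-char c = membership; exact)
def pvFindIfsGo (ifsC : List Char) : List Char → Int → Int
  | [], _ => -1
  | c :: rest, pos => if ifsC.contains c then pos else pvFindIfsGo ifsC rest (pos + 1)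

-- port of _find_ifs_char
def find_ifs_char_py (s ifs : List Char) : Int := pvFindIfsGo ifs s 0

-- A's 'for _ in range(n - 1)' loop over (parts, remaining)
def pvIfsLoopA (ifsC ifswC : List Char) : Nat → List (List Char) → List Char → List (List Char) × List Char
  | 0, parts, remaining => (parts, remaining)
  | fuel + 1, parts, remaining =>
      if remaining = [] then (parts, remaining)
      else
        let best := find_ifs_char_py remaining ifsC
        if best = -1 then (parts, remaining)
        else
          let part := PySem.List.slice remaining none (some best)         -- remaining[:best]
          let rem1 := PySem.List.slice remaining (some (best + 1)) none   -- remaining[best+1:]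
          let rem2 := if ifswC ≠ [] then pvLstripW rem1 ifswC else rem1
          pvIfsLoopA ifsC ifswC fuel (parts ++ [part]) rem2

def ifs_split_n_py (line : String) (ifs : String) (n : Int) : List String :=
  if n ≤ 1 ∨ ifs.toList = [] then [line]
  else
    let ifswC := ifs.toList.filter (fun c => (" \t\n".toList).contains c)
    let rem0 := if ifswC ≠ [] then pvLstripW line.toList ifswC else line.toList
    let pr := pvIfsLoopA ifs.toList ifswC (n - 1).toNat [] rem0
    let remaining := if ifswC ≠ [] then pvRstripW pr.2 ifswC else pr.2
    (pr.1 ++ [remaining]).map (fun cs => String.ofList cs)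

-- ===== PORT B =====

-- port of re.split('[ifs][ifs_white]*', s, maxsplit) for exactly Source B's pattern: scan left to
-- right; a delimiter match is one char of ifs followed by a greedy run of ifs_white chars
-- (exact for this pattern; cur holds the current field reversed)
def pvReSplitIfs (ifsC ifswC : List Char) : List Char → Nat → List Char → List (List Char)
  | [], _, cur => [cur.reverse]
  | c :: rest, 0, cur => [cur.reverse ++ c :: rest]
  | c :: rest, m + 1, cur =>
      if ifsC.contains c then
        cur.reverse :: pvReSplitIfs ifsC ifswC (rest.dropWhile (fun d => ifswC.contains d)) m []
      else
        pvReSplitIfs ifsC ifswC rest (m + 1) (c :: cur)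
  termination_by cs m _ => (m, cs.length)
  decreasing_by
    · exact Prod.Lex.left _ _ (Nat.lt_succ_self m)
    · exact Prod.Lex.right (m + 1) (by simp)

def ifs_split_n_py_alt (line : String) (ifs : String) (n : Int) : List String :=
  if n ≤ 1 ∨ ifs.toList = [] then [line]
  else
    let ifswC := ifs.toList.filter (fun c => (" \t\n".toList).contains c)
    let cs := if ifswC ≠ [] then pvLstripW line.toList ifswC else line.toList
    let fields := pvReSplitIfs ifs.toList ifswC cs (n - 1).toNat []
    -- fields[-1] = fields[-1].rstrip(ifs_white)
    let fields' := if ifswC ≠ [] then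
        fields.dropLast ++ [pvRstripW (PySem.List.pyGetD fields (-1) []) ifswC]
      else fields
    fields'.map (fun cs => String.ofList cs)

-- ===== PRECONDITION & SPEC =====
def Spec_ifs_split_n_py (line : String) (ifs : String) (n : Int) (out : List String) : Prop := out = ifs_split_n_py_alt line ifs n
instance (line : String) (ifs : String) (n : Int) (out : List String) : Decidable (Spec_ifs_split_n_py line ifs n out) := by unfold Spec_ifs_split_n_py; infer_instance

-- ===== CLAIM (what is proved, stated in full; the proofs are below) =====
def Claim_equal_ifs_split_n_py : Prop := ∀ (line : String) (ifs : String) (n : Int), Dom_ifs_split_n_py line ifs n → Spec_ifs_split_n_py line ifs n (ifs_split_n_py line ifs n)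

-- ===== LEMMAS AND PROOFS =====

-- prepend a prefix to the first field of a nonempty field list
def pvPrefixFirst (p : List Char) : List (List Char) → List (List Char)
  | [] => [p]
  | x :: xs => (p ++ x) :: xs

lemma pvCondLstrip (ifswC r : List Char) :
    (if ifswC ≠ [] then pvLstripW r ifswC else r) = r.dropWhile (fun c => ifswC.contains c) := by
  by_cases h : ifswC = []
  · subst h; symm; simp
  · simp [h, pvLstripW]

lemma pvFindIfsGo_lb (ifsC s : List Char) (p : Int) :
    pvFindIfsGo ifsC s p = -1 ∨ p ≤ pvFindIfsGo ifsC s p := by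
  induction s generalizing p with
  | nil => left; simp [pvFindIfsGo]
  | cons c rest ih =>
    by_cases hc : c ∈ ifsC
    · right; simp [pvFindIfsGo, hc]
    · have hc' : ¬(ifsC.contains c = true) := by simpa using hc
      simp only [pvFindIfsGo]
      rw [if_neg hc']
      rcases ih (p + 1) with h | h
      · left; exact h
      · right; omega

lemma pvFindIfsGo_nonneg (ifsC s : List Char) (h : pvFindIfsGo ifsC s 0 ≠ -1) :
    0 ≤ pvFindIfsGo ifsC s 0 := by
  rcases pvFindIfsGo_lb ifsC s 0 with h0 | h0
  · exact absurd h0 h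
  · exact h0

lemma pvFindIfsGo_shift (ifsC s : List Char) (p : Int) (hp : 0 ≤ p) :
    pvFindIfsGo ifsC s p =
      if pvFindIfsGo ifsC s 0 = -1 then -1 else pvFindIfsGo ifsC s 0 + p := by
  induction s generalizing p with
  | nil => simp [pvFindIfsGo]
  | cons c rest ih =>
    by_cases hc : c ∈ ifsC
    · simp [pvFindIfsGo, hc]
    · have hc' : ¬(ifsC.contains c = true) := by simpa using hc
      simp only [pvFindIfsGo]
      rw [if_neg hc', if_neg hc', ih (p + 1) (by omega), ih (0 + 1) (by omega)]
      have hlb := pvFindIfsGo_lb ifsC rest 0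
      by_cases h0 : pvFindIfsGo ifsC rest 0 = -1 <;> simp [h0] <;> split <;> omega

lemma pvIfsLoopA_acc (ifsC ifswC : List Char) (fuel : Nat) :
    ∀ rem parts, pvIfsLoopA ifsC ifswC fuel parts rem =
      (parts ++ (pvIfsLoopA ifsC ifswC fuel [] rem).1, (pvIfsLoopA ifsC ifswC fuel [] rem).2) := by
  induction fuel with
  | zero => intro rem parts; simp [pvIfsLoopA]
  | succ m ih =>
    intro rem parts
    by_cases hr : rem = []
    · simp [pvIfsLoopA, hr]
    · by_cases hb : find_ifs_char_py rem ifsC = -1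
      · simp [pvIfsLoopA, hr, hb]
      · simp only [pvIfsLoopA, hr, hb, if_false]
        rw [ih _ (parts ++ _), ih _ ([] ++ _)]
        simp

lemma pvPrefixFirst_nil (xs : List (List Char)) (x : List Char) :
    pvPrefixFirst [] (xs ++ [x]) = xs ++ [x] := by
  cases xs <;> simp [pvPrefixFirst]

lemma pvSplit_eq_loop (ifsC ifswC : List Char) (fuel : Nat) (rem cur : List Char) :
    pvReSplitIfs ifsC ifswC rem fuel cur =
      pvPrefixFirst cur.reverse
        ((pvIfsLoopA ifsC ifswC fuel [] rem).1 ++ [(pvIfsLoopA ifsC ifswC fuel [] rem).2]) := by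
  induction fuel generalizing rem cur with
  | zero => cases rem <;> simp [pvReSplitIfs, pvIfsLoopA, pvPrefixFirst]
  | succ m ihm =>
    induction rem generalizing cur with
    | nil => simp [pvReSplitIfs, pvIfsLoopA, pvPrefixFirst]
    | cons c rest ihr =>
      by_cases hc : c ∈ ifsC
      · -- c is a delimiter: A finds it at index 0
        have hfind : find_ifs_char_py (c :: rest) ifsC = 0 := by
          simp [find_ifs_char_py, pvFindIfsGo, hc]
        have hA : pvIfsLoopA ifsC ifswC (m + 1) [] (c :: rest) =
            ([[]] ++ (pvIfsLoopA ifsC ifswC m [] (rest.dropWhile (fun d => ifswC.contains d))).1,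
             (pvIfsLoopA ifsC ifswC m [] (rest.dropWhile (fun d => ifswC.contains d))).2) := by
          rw [pvIfsLoopA]
          simp only [hfind, pvCondLstrip]
          rw [PySem.List.slice_to _ (by norm_num), PySem.List.slice_from _ (by norm_num)]
          rw [pvIfsLoopA_acc]
          simp
        rw [pvReSplitIfs]; rw [if_pos (by simpa using hc)]
        rw [ihm, hA, List.reverse_nil, pvPrefixFirst_nil]
        simp [pvPrefixFirst]
      · -- c is not a delimiter
        have hc' : ¬(ifsC.contains c = true) := by simpa using hc
        have hshift : find_ifs_char_py (c :: rest) ifsC =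
            (if find_ifs_char_py rest ifsC = -1 then -1 else find_ifs_char_py rest ifsC + 1) := by
          simp only [find_ifs_char_py, pvFindIfsGo]
          rw [if_neg hc']
          exact pvFindIfsGo_shift ifsC rest (0 + 1) (by omega)
        rw [pvReSplitIfs]; rw [if_neg hc']
        rw [ihr]
        by_cases hf : find_ifs_char_py rest ifsC = -1
        · -- no delimiter anywhere
          have hA : pvIfsLoopA ifsC ifswC (m + 1) [] (c :: rest) = ([], c :: rest) := by
            rw [pvIfsLoopA]; simp [hshift, hf]
          have hArest : pvIfsLoopA ifsC ifswC (m + 1) [] rest = ([], rest) := by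
            cases rest with
            | nil => simp [pvIfsLoopA]
            | cons d ds => rw [pvIfsLoopA]; simp [hf]
          rw [hA, hArest]; simp [pvPrefixFirst]
        · -- delimiter at f in rest, hence at f+1 in c :: rest
          have hf0 : 0 ≤ find_ifs_char_py rest ifsC := pvFindIfsGo_nonneg ifsC rest hf
          have hrest : rest ≠ [] := by
            intro h; subst h; simp [find_ifs_char_py, pvFindIfsGo] at hf
          set f := find_ifs_char_py rest ifsC with hfdef
          have hA : pvIfsLoopA ifsC ifswC (m + 1) [] (c :: rest) =
              ([c :: List.take f.toNat rest] ++
                 (pvIfsLoopA ifsC ifswC m []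
                   ((rest.drop (f.toNat + 1)).dropWhile (fun d => ifswC.contains d))).1,
               (pvIfsLoopA ifsC ifswC m []
                   ((rest.drop (f.toNat + 1)).dropWhile (fun d => ifswC.contains d))).2) := by
            rw [pvIfsLoopA]
            simp only [hshift, hf, if_false, pvCondLstrip]
            have h1 : (f + 1 : Int) = -1 → False := by omega
            simp only [if_neg (by simpa using h1), reduceCtorEq, if_false]
            rw [PySem.List.slice_to _ (by omega), PySem.List.slice_from _ (by omega)]
            have ht : (f + 1).toNat = f.toNat + 1 := by omega
            have ht2 : (f + 1 + 1).toNat = f.toNat + 2 := by omega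
            rw [ht, ht2, List.take_succ_cons]
            rw [pvIfsLoopA_acc]
            simp [List.drop_succ_cons]
          have hArest : pvIfsLoopA ifsC ifswC (m + 1) [] rest =
              ([List.take f.toNat rest] ++
                 (pvIfsLoopA ifsC ifswC m []
                   ((rest.drop (f.toNat + 1)).dropWhile (fun d => ifswC.contains d))).1,
               (pvIfsLoopA ifsC ifswC m []
                   ((rest.drop (f.toNat + 1)).dropWhile (fun d => ifswC.contains d))).2) := by
            rw [pvIfsLoopA]
            simp only [← hfdef, hf, if_neg hrest, if_false, pvCondLstrip]
            rw [PySem.List.slice_to _ (by omega), PySem.List.slice_from _ (by omega)]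
            have ht : (f + 1).toNat = f.toNat + 1 := by omega
            rw [ht, pvIfsLoopA_acc]
            simp
          rw [hA, hArest]; simp [pvPrefixFirst]

-- ===== VERDICT (by name: the statement is the Claim_ definition above) =====
theorem ifs_split_n_py_spec : Claim_equal_ifs_split_n_py := by
  unfold Claim_equal_ifs_split_n_py
  intro line ifs n _
  unfold Spec_ifs_split_n_py ifs_split_n_py ifs_split_n_py_alt
  by_cases hg : n ≤ 1 ∨ ifs.toList = []
  · rw [if_pos hg, if_pos hg]
  · rw [if_neg hg, if_neg hg]
    simp only []
    rw [pvSplit_eq_loop, List.reverse_nil, pvPrefixFirst_nil]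
    by_cases hww : ifs.toList.filter (fun c => (" \t\n".toList).contains c) = []
    · have h1 : ¬(List.filter (fun c => (" \t\n".toList).contains c) ifs.toList ≠ []) :=
        not_not_intro hww
      rw [if_neg h1]
      rw [if_neg h1]
      rw [if_neg h1]
    · simp only [if_pos hww]
      rw [PySem.List.pyGetD_neg_one_append_singleton, List.dropLast_concat]
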